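-- pv_equiv track=rewrite | github.com/f4pga/f4pga-arch-defs | xc/xc7/fasm2bels/verilog_modeling.py | make_bus
-- ===== SOURCE A (Python) =====
-- def make_bus(wires):
--     """ Combine bus wires into a consecutive bus.
--
--     Args:
--         wires ([str]): Takes list of wire names.
--
--     Returns list of (wire/bus name, max bus wire count).
--
--     If the wire is NOT a bus, then max bus wire count will be None.
--     If the wire was part of a bus, then max bus wire count will be the maximum
--     observed bus index.  It is assumed that all buses will be sized as
--     [max:0].
--
--     >>> list(make_bus(['A', 'B']))
--     [('A', None), ('B', None)]
--     >>> list(make_bus(['A[0]', 'A[1]', 'B']))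
--     [('A', 1), ('B', None)]
--     >>> list(make_bus(['A[0]', 'A[1]', 'B[0]']))
--     [('A', 1), ('B', 0)]
--
--     """
--     output = {}
--     buses = {}
--
--     for w in wires:
--         widx = w.rfind('[')
--         if widx != -1 and w[-1] == ']':
--
--             bus = w[0:widx]
--             idx = int(w[widx + 1:-1])
--
--             if bus not in buses:
--                 buses[bus] = []
--
--             buses[bus].append(idx)
--         else:
--             output[w] = None
--
--     for bus, values in buses.items():
--         output[bus] = max(values)
--
--     for name in sorted(output):
--         yield name, output[name]
-- ===== SOURCE B (Python) =====
-- def make_bus(wires):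
--     """ Combine bus wires into a consecutive bus.
--
--     Sort-then-scan: parse every wire into a (name, index-or-None) pair,
--     sort the pairs, then scan consecutive equal-name groups taking the
--     maximum observed index (None if the group has no indexed wire).
--     No dict is used at all.
--     """
--     parsed = []
--     for w in wires:
--         widx = w.rfind('[')
--         if widx != -1 and w[-1] == ']':
--             parsed.append((w[0:widx], int(w[widx + 1:-1])))
--         else:
--             parsed.append((w, None))
--     parsed.sort(key=lambda p: p[0])
--     i = 0
--     n = len(parsed)
--     while i < n:
--         name, best = parsed[i]
--         j = i + 1
--         while j < n and parsed[j][0] == name: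
--             v = parsed[j][1]
--             if v is not None and (best is None or v > best):
--                 best = v
--             j += 1
--         yield name, best
--         i = j
-- ===== Notes on version B (the rewrite author's own statement) =====
-- stated objective: alternative
-- what changed: Replaced A's dict-based aggregation (a dict of per-bus index lists reduced by max in a second loop, then sorted keys) by a sort-then-scan group-by: parse all wires into (name, index-or-None) pairs, sort the pairs, and scan consecutive equal-name groups taking the running maximum index; correct because the per-name result is a max, which is order-insensitive.
import Mathlib
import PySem

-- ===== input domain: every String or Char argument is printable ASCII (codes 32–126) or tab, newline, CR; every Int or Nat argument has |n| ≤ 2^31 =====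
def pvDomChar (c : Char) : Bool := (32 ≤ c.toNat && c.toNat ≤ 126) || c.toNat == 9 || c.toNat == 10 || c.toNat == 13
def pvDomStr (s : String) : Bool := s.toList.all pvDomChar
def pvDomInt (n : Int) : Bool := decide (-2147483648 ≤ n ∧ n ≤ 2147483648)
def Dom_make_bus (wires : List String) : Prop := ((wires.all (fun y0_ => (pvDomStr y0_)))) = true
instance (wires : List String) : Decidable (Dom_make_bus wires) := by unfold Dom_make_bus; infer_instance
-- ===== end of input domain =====

-- B replaces A's dict aggregation (per-bus index lists reduced by max in a second loop)
-- by a sort-then-scan group-by over parsed (name, index-or-None) pairs (alternative).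

-- ===== PORT A =====
-- one iteration of A's first loop over the pair state (output, buses)
def mbStepA (st : PySem.Dict String (Option Int) × PySem.Dict String (List Int)) (w : String) :
    PySem.Dict String (Option Int) × PySem.Dict String (List Int) :=
  let output := st.1
  let buses := st.2
  let widx := PySem.Str.rfind w "["
  if widx ≠ -1 ∧ PySem.Str.pyGet? w (-1) = some ']' then
    let bus := PySem.Str.slice w (some 0) (some widx)
    match PySem.Int.ofStr? (PySem.Str.slice w (some (widx + 1)) (some (-1))) with
    | some idx =>
      let buses' := if ¬ buses.contains bus then buses.insert bus ([] : List Int) else buses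
      -- buses[bus].append(idx): overwrite keeps the key's position
      (output, buses'.insert bus (buses'.getD bus [] ++ [idx]))
    | none => (output, buses)  -- int() raises here in Python; excluded by Pre_make_bus
  else
    (output.insert w none, buses)

-- one iteration of A's second loop: output[bus] = max(values)
def mbFinA (o : PySem.Dict String (Option Int)) (p : String × List Int) :
    PySem.Dict String (Option Int) :=
  match PySem.List.max? p.2 (fun x => x) with
  | some m => o.insert p.1 (some m)
  | none => o  -- max([]) raises in Python; buses' values are never empty

def make_bus (wires : List String) : List (String × Option Int) :=
  let st := wires.foldl mbStepA (PySem.Dict.empty, PySem.Dict.empty)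
  let output := st.2.items.foldl mbFinA st.1
  (PySem.List.sorted output.keys (fun x => x) false).map
    (fun name => (name, (output.get? name).getD none))

-- ===== PORT B =====
-- B's first loop body: parse one wire into its (name, index-or-None) pair
def parseWire (w : String) : String × Option Int :=
  let widx := PySem.Str.rfind w "["
  if widx ≠ -1 ∧ PySem.Str.pyGet? w (-1) = some ']' then
    match PySem.Int.ofStr? (PySem.Str.slice w (some (widx + 1)) (some (-1))) with
    | some idx => (PySem.Str.slice w (some 0) (some widx), some idx)
    | none => (w, none)  -- int() raises here in Python; excluded by Pre_make_bus
  else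
    (w, none)

-- B's inner while-loop body: if v is not None and (best is None or v > best): best = v
def bstep (best : Option Int) (q : String × Option Int) : Option Int :=
  match q.2 with
  | some v =>
    match best with
    | none => some v
    | some c => if v > c then some v else best
  | none => best

-- B's outer while loop: take one equal-name group, fold its indices, recurse on the rest
def groupScan : List (String × Option Int) → List (String × Option Int)
  | [] => []
  | p :: rest =>
    (p.1, (rest.takeWhile (fun q => q.1 == p.1)).foldl bstep p.2) ::
      groupScan (rest.dropWhile (fun q => q.1 == p.1))
termination_by l => l.length
decreasing_by
  simpa using Nat.lt_succ_of_le (List.length_dropWhile_le _ rest)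

def make_bus_alt (wires : List String) : List (String × Option Int) :=
  groupScan (PySem.List.sorted (wires.map parseWire) (fun p => p.1) false)

-- ===== PRECONDITION & SPEC =====
-- Pre_ excludes exactly the inputs where A's int(w[widx+1:-1]) raises ValueError
-- (a wire looking like 'name[junk]' whose bracket content is not an int literal).
def Pre_make_bus (wires : List String) : Prop :=
  ∀ w ∈ wires,
    (PySem.Str.rfind w "[" ≠ -1 ∧ PySem.Str.pyGet? w (-1) = some ']') →
    (PySem.Int.ofStr? (PySem.Str.slice w (some (PySem.Str.rfind w "[" + 1)) (some (-1)))).isSome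

instance (wires : List String) : Decidable (Pre_make_bus wires) := by
  unfold Pre_make_bus; infer_instance

def pvWitness_make_bus : List String := (["A[0]", "A[1]", "B"])

def Spec_make_bus (wires : List String) (out : List (String × Option Int)) : Prop :=
  out = make_bus_alt wires
instance (wires : List String) (out : List (String × Option Int)) : Decidable (Spec_make_bus wires out) := by
  unfold Spec_make_bus; infer_instance

-- ===== CLAIM (what is proved, stated in full; the proofs are below) =====
def Claim_equal_make_bus : Prop :=
  ∀ (wires : List String), Dom_make_bus wires → Pre_make_bus wires →
    Spec_make_bus wires (make_bus wires)

-- ===== LEMMAS AND PROOFS =====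

-- ---- ghost abstraction shared by both proofs: one dict of running max indices ----

-- output[base] = idx if cur is None else max(cur, idx), where cur = output.get(base)
def mbUpd (output : PySem.Dict String (Option Int)) (base : String) (idx : Int) :
    PySem.Dict String (Option Int) :=
  match output.get? base with
  | some (some cur) => output.insert base (some (max cur idx))
  | _ => output.insert base (some idx)

-- ghost per-wire step (single-pass dict of running max indices)
def gStepW (output : PySem.Dict String (Option Int)) (w : String) :
    PySem.Dict String (Option Int) :=
  let widx := PySem.Str.rfind w "["
  if widx ≠ -1 ∧ PySem.Str.pyGet? w (-1) = some ']' then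
    let base := PySem.Str.slice w (some 0) (some widx)
    match PySem.Int.ofStr? (PySem.Str.slice w (some (widx + 1)) (some (-1))) with
    | some idx => mbUpd output base idx
    | none => output
  else
    output.setdefault w none

-- ghost step on an already-parsed pair
def gstep (output : PySem.Dict String (Option Int)) (p : String × Option Int) :
    PySem.Dict String (Option Int) :=
  match p.2 with
  | some idx => mbUpd output p.1 idx
  | none => output.setdefault p.1 none

-- abstract per-name accumulator (state = dict cell: absent / stored None / stored index)
def aStep (st : Option (Option Int)) (v : Option Int) : Option (Option Int) :=
  match v with
  | none => some (st.getD none)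
  | some idx =>
    match st with
    | some (some cur) => some (some (max cur idx))
    | _ => some (some idx)

-- the value both programs output for name n, as a fold over the parsed pairs
def valOf (ps : List (String × Option Int)) (n : String) : Option Int :=
  (((ps.filter (fun q => q.1 == n)).map Prod.snd).foldl aStep none).getD none

-- ordered first-occurrence dedup by structural recursion (proof-side skeleton of the group scan)
def dedupF : List String → List String
  | [] => []
  | a :: xs => a :: dedupF (xs.filter (fun x => !(x == a)))
termination_by l => l.length
decreasing_by
  simp only [List.length_cons, Nat.lt_succ_iff, List.length_unattach]
  exact (List.length_filter_le _ _).trans (by simp)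

-- ---- A-side: A equals the sorted rendering of the ghost dict ----

theorem stepA_bus (oA : PySem.Dict String (Option Int)) (buses : PySem.Dict String (List Int))
    (w : String) (idx : Int)
    (hc : PySem.Str.rfind w "[" ≠ -1 ∧ PySem.Str.pyGet? w (-1) = some ']')
    (hidx : PySem.Int.ofStr? (PySem.Str.slice w (some (PySem.Str.rfind w "[" + 1)) (some (-1))) = some idx) :
    mbStepA (oA, buses) w =
      (oA, buses.insert (PySem.Str.slice w (some 0) (some (PySem.Str.rfind w "[")))
        (buses.getD (PySem.Str.slice w (some 0) (some (PySem.Str.rfind w "["))) [] ++ [idx])) := by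
  unfold mbStepA
  rw [if_pos hc, hidx]
  dsimp only
  set b := PySem.Str.slice w (some 0) (some (PySem.Str.rfind w "[")) with hbdef
  by_cases hcb : buses.contains b = true
  · rw [if_neg (not_not_intro hcb)]
  · have hcb' : buses.contains b = false := by simpa using hcb
    rw [if_pos hcb, PySem.Dict.getD_insert_self, PySem.Dict.insert_insert_self,
        PySem.Dict.getD_of_not_contains _ _ hcb', List.nil_append]

theorem gStepW_bus (oB : PySem.Dict String (Option Int)) (w : String) (idx : Int)
    (hc : PySem.Str.rfind w "[" ≠ -1 ∧ PySem.Str.pyGet? w (-1) = some ']')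
    (hidx : PySem.Int.ofStr? (PySem.Str.slice w (some (PySem.Str.rfind w "[" + 1)) (some (-1))) = some idx) :
    gStepW oB w = mbUpd oB (PySem.Str.slice w (some 0) (some (PySem.Str.rfind w "["))) idx := by
  unfold gStepW
  rw [if_pos hc, hidx]

theorem stepA_plain (oA : PySem.Dict String (Option Int)) (buses : PySem.Dict String (List Int))
    (w : String)
    (hc : ¬ (PySem.Str.rfind w "[" ≠ -1 ∧ PySem.Str.pyGet? w (-1) = some ']')) :
    mbStepA (oA, buses) w = (oA.insert w none, buses) := by
  unfold mbStepA
  rw [if_neg hc]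

theorem gStepW_plain (oB : PySem.Dict String (Option Int)) (w : String)
    (hc : ¬ (PySem.Str.rfind w "[" ≠ -1 ∧ PySem.Str.pyGet? w (-1) = some ']')) :
    gStepW oB w = oB.setdefault w none := by
  unfold gStepW
  rw [if_neg hc]

-- max of a nonempty Python list, as A's second loop computes it
def busVal : List Int → Option Int
  | [] => none
  | x :: t => some (t.foldl max x)

-- the value A's finished dict holds at key k, in terms of the phase-1 state
def finVal (oA : PySem.Dict String (Option Int)) (buses : PySem.Dict String (List Int))
    (k : String) : Option (Option Int) :=
  match buses.get? k with
  | some vs => (busVal vs).map some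
  | none => oA.get? k

def InvAB (oA : PySem.Dict String (Option Int)) (buses : PySem.Dict String (List Int))
    (oB : PySem.Dict String (Option Int)) : Prop :=
  oA.keys.Nodup ∧ buses.keys.Nodup ∧ oB.keys.Nodup ∧
  (∀ k vs, buses.get? k = some vs → vs ≠ []) ∧
  (∀ k v, oA.get? k = some v → v = none) ∧
  (∀ k, oB.get? k = finVal oA buses k)

theorem inv_core_bus (oA : PySem.Dict String (Option Int)) (buses : PySem.Dict String (List Int))
    (oB : PySem.Dict String (Option Int)) (b : String) (idx : Int) (h : InvAB oA buses oB) :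
    InvAB oA (buses.insert b (buses.getD b [] ++ [idx])) (mbUpd oB b idx) := by
  obtain ⟨hA, hBu, hB, hne, hval, hget⟩ := h
  have hB' : (mbUpd oB b idx).keys.Nodup := by
    unfold mbUpd
    rcases oB.get? b with _ | (_ | cur) <;>
      exact PySem.Dict.nodup_keys_insert _ _ _ hB
  refine ⟨hA, PySem.Dict.nodup_keys_insert _ _ _ hBu, hB', ?_, hval, ?_⟩
  · intro k vs hk
    rw [PySem.Dict.get?_insert] at hk
    split at hk
    · cases hk; simp
    · exact hne k vs hk
  · intro k
    by_cases hkb : k = b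
    · subst hkb
      have hfv : finVal oA (buses.insert k (buses.getD k [] ++ [idx])) k =
          (busVal (buses.getD k [] ++ [idx])).map some := by
        simp [finVal]
      rw [hfv]
      cases hbb : buses.get? k with
      | none =>
        have hgd : buses.getD k [] = [] := by
          rw [PySem.Dict.getD_eq_get?_getD, hbb]; rfl
        have hob : oB.get? k = oA.get? k := by
          rw [hget k]; simp [finVal, hbb]
        rw [hgd]
        cases hoa : oA.get? k with
        | none =>
          rw [← hob] at hoa
          simp [mbUpd, hoa, busVal]
        | some v =>
          have := hval k v hoa
          subst this
          rw [← hob] at hoa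
          simp [mbUpd, hoa, busVal]
      | some vs =>
        have hvs := hne k vs hbb
        obtain ⟨x, t, rfl⟩ : ∃ x t, vs = x :: t := by
          cases vs with
          | nil => exact absurd rfl hvs
          | cons x t => exact ⟨x, t, rfl⟩
        have hgd : buses.getD k [] = x :: t := by
          rw [PySem.Dict.getD_eq_get?_getD, hbb]; rfl
        have hob : oB.get? k = some (some (t.foldl max x)) := by
          rw [hget k]; simp [finVal, hbb, busVal]
        rw [hgd]
        simp [mbUpd, hob, busVal, List.foldl_append]
    · have hfv : finVal oA (buses.insert b (buses.getD b [] ++ [idx])) k = finVal oA buses k := by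
        simp [finVal, PySem.Dict.get?_insert, hkb]
      rw [hfv, ← hget k]
      unfold mbUpd
      rcases oB.get? b with _ | (_ | cur) <;>
        simp [PySem.Dict.get?_insert, hkb]

theorem inv_core_plain (oA : PySem.Dict String (Option Int)) (buses : PySem.Dict String (List Int))
    (oB : PySem.Dict String (Option Int)) (w : String) (h : InvAB oA buses oB) :
    InvAB (oA.insert w none) buses (oB.setdefault w none) := by
  obtain ⟨hA, hBu, hB, hne, hval, hget⟩ := h
  have hB' : (oB.setdefault w none).keys.Nodup := by
    by_cases hcw : oB.contains w
    · rw [PySem.Dict.setdefault_of_contains _ _ hcw]; exact hB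
    · rw [PySem.Dict.setdefault_of_not_contains _ _ (by simpa using hcw)]
      exact PySem.Dict.nodup_keys_insert _ _ _ hB
  refine ⟨PySem.Dict.nodup_keys_insert _ _ _ hA, hBu, hB', hne, ?_, ?_⟩
  · intro k v hk
    rw [PySem.Dict.get?_insert] at hk
    split at hk
    · cases hk; rfl
    · exact hval k v hk
  · intro k
    by_cases hkw : k = w
    · subst hkw
      cases hbb : buses.get? k with
      | some vs =>
        have hvs := hne k vs hbb
        have hob : oB.get? k = (busVal vs).map some := by
          rw [hget k]; simp [finVal, hbb]
        have hbv : ∃ m, busVal vs = some m := by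
          cases vs with
          | nil => exact absurd rfl hvs
          | cons x t => exact ⟨_, rfl⟩
        obtain ⟨m, hm⟩ := hbv
        have hcw : oB.contains k = true := by
          rw [PySem.Dict.contains_eq_isSome_get?, hob, hm]; rfl
        rw [PySem.Dict.setdefault_of_contains _ _ hcw, hob]
        simp [finVal, hbb]
      | none =>
        have hob : oB.get? k = oA.get? k := by
          rw [hget k]; simp [finVal, hbb]
        have hfv : finVal (oA.insert k none) buses k = some none := by
          simp [finVal, hbb]
        rw [hfv]
        by_cases hcw : oB.contains k
        · rw [PySem.Dict.setdefault_of_contains _ _ hcw]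
          have hs : (oB.get? k).isSome := by
            rw [PySem.Dict.contains_eq_isSome_get?] at hcw; exact hcw
          rw [hob] at hs ⊢
          obtain ⟨v, hv⟩ := Option.isSome_iff_exists.mp hs
          rw [hv, hval k v hv]
        · rw [PySem.Dict.setdefault_of_not_contains _ _ (by simpa using hcw)]
          simp
    · rw [PySem.Dict.get?_setdefault_of_ne _ _ hkw, hget k]
      cases hbb : buses.get? k with
      | some vs => simp [finVal, hbb]
      | none => simp [finVal, hbb, PySem.Dict.get?_insert, hkw]

theorem inv_step (oA : PySem.Dict String (Option Int)) (buses : PySem.Dict String (List Int))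
    (oB : PySem.Dict String (Option Int)) (w : String)
    (hpre : (PySem.Str.rfind w "[" ≠ -1 ∧ PySem.Str.pyGet? w (-1) = some ']') →
      (PySem.Int.ofStr? (PySem.Str.slice w (some (PySem.Str.rfind w "[" + 1)) (some (-1)))).isSome)
    (h : InvAB oA buses oB) :
    InvAB (mbStepA (oA, buses) w).1 (mbStepA (oA, buses) w).2 (gStepW oB w) := by
  by_cases hc : (PySem.Str.rfind w "[" ≠ -1 ∧ PySem.Str.pyGet? w (-1) = some ']')
  · obtain ⟨idx, hidx⟩ := Option.isSome_iff_exists.mp (hpre hc)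
    rw [stepA_bus oA buses w idx hc hidx, gStepW_bus oB w idx hc hidx]
    exact inv_core_bus oA buses oB _ idx h
  · rw [stepA_plain oA buses w hc, gStepW_plain oB w hc]
    exact inv_core_plain oA buses oB w h

theorem inv_fold (wires : List String) (oA : PySem.Dict String (Option Int))
    (buses : PySem.Dict String (List Int)) (oB : PySem.Dict String (Option Int))
    (hpre : Pre_make_bus wires) (h : InvAB oA buses oB) :
    InvAB (wires.foldl mbStepA (oA, buses)).1 (wires.foldl mbStepA (oA, buses)).2
      (wires.foldl gStepW oB) := by
  induction wires generalizing oA buses oB with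
  | nil => exact h
  | cons w ws ih =>
    have hstep := inv_step oA buses oB w (hpre w (List.mem_cons_self)) h
    have hpre' : Pre_make_bus ws := fun x hx => hpre x (List.mem_cons_of_mem _ hx)
    exact ih (mbStepA (oA, buses) w).1 (mbStepA (oA, buses) w).2 (gStepW oB w) hpre' hstep

-- first match by key in a raw pair list
def lookupP (l : List (String × List Int)) (k : String) : Option (List Int) :=
  (l.find? (fun p => p.1 == k)).map Prod.snd

theorem lookupP_mem {l : List (String × List Int)} {k : String} {vs : List Int}
    (h : lookupP l k = some vs) : k ∈ l.map Prod.fst := by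
  unfold lookupP at h
  cases hf : l.find? (fun p => p.1 == k) with
  | none => rw [hf] at h; cases h
  | some q =>
    have hq := List.find?_some hf
    have hmem := List.mem_of_find?_eq_some hf
    have : q.1 = k := by simpa using hq
    exact this ▸ List.mem_map_of_mem hmem

theorem foldl_finA_get? (l : List (String × List Int)) (o : PySem.Dict String (Option Int))
    (hnd : (l.map Prod.fst).Nodup) (hne : ∀ p ∈ l, p.2 ≠ []) (k : String) :
    (l.foldl mbFinA o).get? k =
      match lookupP l k with
      | some vs => (busVal vs).map some
      | none => o.get? k := by
  induction l generalizing o with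
  | nil => simp [lookupP]
  | cons p t ih =>
    obtain ⟨b, vs⟩ := p
    have hvs := hne (b, vs) List.mem_cons_self
    obtain ⟨x, xs, rfl⟩ : ∃ x xs, vs = x :: xs := by
      cases vs with
      | nil => exact absurd rfl hvs
      | cons x xs => exact ⟨x, xs, rfl⟩
    simp only [List.map_cons, List.nodup_cons] at hnd
    obtain ⟨hbt, hndt⟩ := hnd
    have hstep : mbFinA o (b, x :: xs) = o.insert b (some (xs.foldl max x)) := by
      simp [mbFinA, PySem.List.max?_id_cons]
    rw [List.foldl_cons, hstep,
        ih _ hndt (fun q hq => hne q (List.mem_cons_of_mem _ hq))]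
    by_cases hk : k = b
    · subst hk
      have hlt : lookupP t k = none := by
        cases hlt : lookupP t k with
        | none => rfl
        | some vs' => exact absurd (lookupP_mem hlt) hbt
      rw [hlt]
      have hlk : lookupP ((k, x :: xs) :: t) k = some (x :: xs) := by
        simp [lookupP]
      rw [hlk]
      simp [busVal]
    · have hbk : (b == k) = false := by
        simp [Ne.symm hk]
      have hlk : lookupP ((b, x :: xs) :: t) k = lookupP t k := by
        simp [lookupP, hbk]
      rw [hlk]
      cases hlt : lookupP t k with
      | some vs' => simp
      | none => simp [PySem.Dict.get?_insert, hk]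

theorem find?_eq_of_mem_nodup {l : List (String × List Int)} {k : String} {v : List Int}
    (hnd : (l.map Prod.fst).Nodup) (hmem : (k, v) ∈ l) :
    l.find? (fun p => p.1 == k) = some (k, v) := by
  induction l with
  | nil => cases hmem
  | cons q t ih =>
    simp only [List.map_cons, List.nodup_cons] at hnd
    obtain ⟨hqt, hndt⟩ := hnd
    rcases List.mem_cons.mp hmem with h | h
    · subst h
      simp
    · by_cases hq : q.1 = k
      · have hk : k ∈ t.map Prod.fst := List.mem_map.mpr ⟨(k, v), h, rfl⟩
        exact absurd (hq ▸ hk) hqt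
      · have hbk : (q.1 == k) = false := by simpa using hq
        simp only [List.find?_cons, hbk]
        exact ih hndt h

theorem lookupP_items (d : PySem.Dict String (List Int)) (hnd : d.keys.Nodup) (k : String) :
    lookupP d.items k = d.get? k := by
  cases h : d.get? k with
  | some v =>
    have hmem := PySem.Dict.mem_items_of_get?_eq_some _ h
    have hnd' : (d.items.map Prod.fst).Nodup := hnd
    rw [lookupP, find?_eq_of_mem_nodup hnd' hmem]
    rfl
  | none =>
    have hnk : k ∉ d.keys := (PySem.Dict.get?_eq_none_iff_not_mem_keys _ _).mp h
    have : ∀ p ∈ d.items, ¬ (p.1 == k) = true := by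
      intro p hp hpk
      exact hnk (by
        have : p.1 = k := by simpa using hpk
        exact this ▸ List.mem_map_of_mem hp)
    rw [lookupP, List.find?_eq_none.mpr this]
    rfl

theorem foldl_finA_nodup (l : List (String × List Int)) (o : PySem.Dict String (Option Int))
    (h : o.keys.Nodup) : (l.foldl mbFinA o).keys.Nodup := by
  induction l generalizing o with
  | nil => exact h
  | cons p t ih =>
    refine ih _ ?_
    unfold mbFinA
    cases PySem.List.max? p.2 (fun x => x) with
    | none => exact h
    | some m => exact PySem.Dict.nodup_keys_insert _ _ _ h

theorem inv_empty : InvAB PySem.Dict.empty PySem.Dict.empty PySem.Dict.empty := by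
  refine ⟨PySem.Dict.nodup_keys_empty, PySem.Dict.nodup_keys_empty,
    PySem.Dict.nodup_keys_empty, ?_, ?_, ?_⟩
  · intro k vs h; rw [PySem.Dict.get?_empty] at h; cases h
  · intro k v h; rw [PySem.Dict.get?_empty] at h; cases h
  · intro k; simp [finVal, PySem.Dict.get?_empty]

-- A's output equals the sorted rendering of the ghost dict
theorem A_eq_ghost (wires : List String) (hpre : Pre_make_bus wires) :
    make_bus wires =
      (PySem.List.sorted (wires.foldl gStepW PySem.Dict.empty).keys (fun x => x) false).map
        (fun name => (name, ((wires.foldl gStepW PySem.Dict.empty).get? name).getD none)) := by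
  have hinv := inv_fold wires PySem.Dict.empty PySem.Dict.empty PySem.Dict.empty hpre inv_empty
  obtain ⟨hA, hBu, hB, hne, hval, hget⟩ := hinv
  show (PySem.List.sorted
      ((wires.foldl mbStepA (PySem.Dict.empty, PySem.Dict.empty)).2.items.foldl mbFinA
        (wires.foldl mbStepA (PySem.Dict.empty, PySem.Dict.empty)).1).keys (fun x => x) false).map
      (fun name => (name,
        (((wires.foldl mbStepA (PySem.Dict.empty, PySem.Dict.empty)).2.items.foldl mbFinA
          (wires.foldl mbStepA (PySem.Dict.empty, PySem.Dict.empty)).1).get? name).getD none)) = _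
  set st := wires.foldl mbStepA (PySem.Dict.empty, PySem.Dict.empty) with hst
  set oB := wires.foldl gStepW PySem.Dict.empty with hoB
  set fA := st.2.items.foldl mbFinA st.1 with hfA
  have hitems_nd : (st.2.items.map Prod.fst).Nodup := hBu
  have hitems_ne : ∀ p ∈ st.2.items, p.2 ≠ [] := by
    intro p hp
    exact hne p.1 p.2 (PySem.Dict.get?_of_mem_items _ hp hBu)
  have hfin : ∀ k, fA.get? k = oB.get? k := by
    intro k
    rw [hfA, foldl_finA_get? _ _ hitems_nd hitems_ne, lookupP_items _ hBu, hget k]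
    cases h : st.2.get? k <;> simp [finVal, h]
  have hfnd : fA.keys.Nodup := foldl_finA_nodup _ _ hA
  have hperm : fA.keys.Perm oB.keys := by
    rw [List.perm_ext_iff_of_nodup hfnd hB]
    intro a
    constructor <;> intro ha
    · by_contra hb
      have h1 := (PySem.Dict.get?_eq_none_iff_not_mem_keys _ _).mpr hb
      rw [← hfin] at h1
      exact ((PySem.Dict.get?_eq_none_iff_not_mem_keys _ _).mp h1) ha
    · by_contra hb
      have h1 := (PySem.Dict.get?_eq_none_iff_not_mem_keys _ _).mpr hb
      rw [hfin] at h1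
      exact ((PySem.Dict.get?_eq_none_iff_not_mem_keys _ _).mp h1) ha
  have hsort : PySem.List.sorted fA.keys (fun x => x) false =
      PySem.List.sorted oB.keys (fun x => x) false :=
    PySem.List.sorted_eq_sorted_of_perm _ _ _ (fun _ _ h => h) hperm
  rw [hsort]
  exact List.map_congr_left (fun a _ => by rw [hfin a])

theorem ghost_keys_nodup (wires : List String) (hpre : Pre_make_bus wires) :
    (wires.foldl gStepW PySem.Dict.empty).keys.Nodup :=
  (inv_fold wires PySem.Dict.empty PySem.Dict.empty PySem.Dict.empty hpre inv_empty).2.2.1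

-- ---- ghost vs the abstract per-name fold ----

-- the per-wire ghost step is the per-pair ghost step on the parsed wire
theorem gStepW_eq_gstep (o : PySem.Dict String (Option Int)) (w : String)
    (hpre : (PySem.Str.rfind w "[" ≠ -1 ∧ PySem.Str.pyGet? w (-1) = some ']') →
      (PySem.Int.ofStr? (PySem.Str.slice w (some (PySem.Str.rfind w "[" + 1)) (some (-1)))).isSome) :
    gStepW o w = gstep o (parseWire w) := by
  by_cases hc : (PySem.Str.rfind w "[" ≠ -1 ∧ PySem.Str.pyGet? w (-1) = some ']')
  · obtain ⟨idx, hidx⟩ := Option.isSome_iff_exists.mp (hpre hc)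
    rw [gStepW_bus o w idx hc hidx]
    unfold parseWire
    rw [if_pos hc, hidx]
    rfl
  · rw [gStepW_plain o w hc]
    unfold parseWire
    rw [if_neg hc]
    rfl

theorem foldl_gStepW_eq (wires : List String) (o : PySem.Dict String (Option Int))
    (hpre : Pre_make_bus wires) :
    wires.foldl gStepW o = (wires.map parseWire).foldl gstep o := by
  induction wires generalizing o with
  | nil => rfl
  | cons w ws ih =>
    rw [List.map_cons, List.foldl_cons, List.foldl_cons,
        gStepW_eq_gstep o w (hpre w (List.mem_cons_self))]
    exact ih _ (fun x hx => hpre x (List.mem_cons_of_mem _ hx))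

-- the ghost dict cell of a key after one pair step
theorem gstep_get? (o : PySem.Dict String (Option Int)) (p : String × Option Int) (n : String) :
    (gstep o p).get? n = if p.1 == n then aStep (o.get? n) p.2 else o.get? n := by
  obtain ⟨m, v⟩ := p
  by_cases hmn : m = n
  · subst hmn
    simp only [beq_self_eq_true, if_pos]
    cases v with
    | none =>
      show (o.setdefault m none).get? m = some ((o.get? m).getD none)
      by_cases hc : o.contains m
      · rw [PySem.Dict.setdefault_of_contains _ _ hc]
        have hs := (PySem.Dict.contains_eq_isSome_get? o m) ▸ hc
        obtain ⟨x, hx⟩ := Option.isSome_iff_exists.mp hs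
        rw [hx]; rfl
      · rw [PySem.Dict.setdefault_of_not_contains _ _ (by simpa using hc)]
        have hn : o.get? m = none := by
          rw [← Option.not_isSome_iff_eq_none, ← PySem.Dict.contains_eq_isSome_get?]
          simpa using hc
        rw [hn]
        simp
    | some idx =>
      show (mbUpd o m idx).get? m = aStep (o.get? m) (some idx)
      unfold mbUpd aStep
      rcases h : o.get? m with _ | (_ | cur) <;> simp
  · have hb : (m == n) = false := by simpa using hmn
    rw [hb, if_neg (by simp)]
    cases v with
    | none =>
      show (o.setdefault m none).get? n = o.get? n
      exact PySem.Dict.get?_setdefault_of_ne _ _ (fun h => hmn h.symm)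
    | some idx =>
      show (mbUpd o m idx).get? n = o.get? n
      have hnm : ¬ n = m := fun h => hmn (Eq.symm h)
      unfold mbUpd
      rcases o.get? m with _ | (_ | cur) <;>
        simp [PySem.Dict.get?_insert, hnm]

-- ghost dict cell = aStep-fold over the pairs carrying that name
theorem gfold_get? (ps : List (String × Option Int)) (o : PySem.Dict String (Option Int))
    (n : String) :
    (ps.foldl gstep o).get? n =
      ((ps.filter (fun q => q.1 == n)).map Prod.snd).foldl aStep (o.get? n) := by
  induction ps generalizing o with
  | nil => rfl
  | cons p t ih =>
    rw [List.foldl_cons, ih]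
    simp only [List.filter_cons]
    by_cases h : (p.1 == n) = true
    · rw [gstep_get?, if_pos h]
      simp [h]
    · have h' : (p.1 == n) = false := by simpa using h
      rw [gstep_get?, if_neg (by simp [h']), h']
      simp

-- aStep never forgets a seen name
theorem foldl_aStep_eq_none (vs : List (Option Int)) (st : Option (Option Int))
    (h : vs.foldl aStep st = none) : vs = [] ∧ st = none := by
  induction vs generalizing st with
  | nil => exact ⟨rfl, h⟩
  | cons v t ih =>
    rw [List.foldl_cons] at h
    have := (ih _ h).2
    cases v with
    | none => simp [aStep] at this
    | some idx => rcases st with _ | (_ | c) <;> simp [aStep] at this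

-- aStep is right-commutative, so the per-name value ignores the order of the pairs
theorem aStep_rightComm : RightCommutative aStep := by
  constructor
  intro st a b
  cases a <;> cases b <;>
    rcases st with _ | (_ | c) <;>
    simp [aStep, max_comm, max_left_comm]

theorem valOf_perm (ps qs : List (String × Option Int)) (h : ps.Perm qs) (n : String) :
    valOf ps n = valOf qs n := by
  unfold valOf
  rw [List.Perm.foldl_eq (rcomm := aStep_rightComm) ((h.filter _).map _)]

-- ---- B-side: the group scan over a key-sorted list ----

-- the inner-loop fold equals the abstract fold (relating best to the dict cell)
theorem bstep_foldl (grp : List (String × Option Int)) (b : Option Int)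
    (st : Option (Option Int)) (hb : b = st.getD none) :
    grp.foldl bstep b = ((grp.map Prod.snd).foldl aStep st).getD none := by
  induction grp generalizing b st with
  | nil => simpa using hb
  | cons q t ih =>
    rw [List.foldl_cons, List.map_cons, List.foldl_cons]
    refine ih _ _ ?_
    subst hb
    rcases q with ⟨m, _ | v⟩
    · rfl
    · rcases st with _ | (_ | c) <;>
      · simp [bstep, aStep, max_def]
        try (split_ifs <;> simp <;> omega)

theorem dedupF_nil : dedupF [] = [] := by simp [dedupF]

theorem dedupF_cons (a : String) (xs : List String) :
    dedupF (a :: xs) = a :: dedupF (xs.filter (fun x => !(x == a))) := by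
  simp [dedupF]

theorem groupScan_nil : groupScan [] = [] := by simp [groupScan]

theorem groupScan_cons (p : String × Option Int) (rest : List (String × Option Int)) :
    groupScan (p :: rest) =
      (p.1, (rest.takeWhile (fun q => q.1 == p.1)).foldl bstep p.2) ::
        groupScan (rest.dropWhile (fun q => q.1 == p.1)) := by
  simp [groupScan]

-- in a key-sorted list, everything past the head's group has a strictly larger key
theorem dropWhile_key_gt (p1 : String) (rest : List (String × Option Int))
    (hple : ∀ k ∈ rest.map Prod.fst, p1 ≤ k)
    (hrest : (rest.map Prod.fst).Pairwise (· ≤ ·)) :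
    ∀ q ∈ rest.dropWhile (fun q => q.1 == p1), p1 < q.1 := by
  induction rest with
  | nil => intro q hq; simp at hq
  | cons r t ih =>
    rw [List.map_cons, List.pairwise_cons] at hrest
    rw [List.dropWhile_cons]
    by_cases hr : (r.1 == p1) = true
    · rw [if_pos hr]
      exact ih (fun k hk => hple k (List.mem_cons_of_mem _ hk)) hrest.2
    · rw [if_neg (by simpa using hr)]
      have hlt : p1 < r.1 :=
        lt_of_le_of_ne (hple _ (List.mem_map_of_mem List.mem_cons_self))
          (fun h => hr (by simp [h.symm]))
      intro q hq
      rcases List.mem_cons.mp hq with rfl | hq'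
      · exact hlt
      · exact lt_of_lt_of_le hlt (hrest.1 _ (List.mem_map_of_mem hq'))

theorem dedupF_mem (l : List String) (x : String) : x ∈ dedupF l ↔ x ∈ l := by
  match l with
  | [] => rw [dedupF_nil]
  | a :: xs =>
    rw [dedupF_cons]
    by_cases hx : x = a
    · subst hx; simp
    · simp only [List.mem_cons, dedupF_mem (xs.filter (fun y => !(y == a))) x,
        List.mem_filter]
      constructor
      · rintro (h | ⟨h, _⟩)
        · exact absurd h hx
        · exact Or.inr h
      · rintro (h | h)
        · exact absurd h hx
        · exact Or.inr ⟨h, by simpa using hx⟩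
termination_by l.length
decreasing_by simpa using Nat.lt_succ_of_le (List.length_filter_le _ xs)

theorem dedupF_nodup (l : List String) : (dedupF l).Nodup := by
  match l with
  | [] => rw [dedupF_nil]; exact List.nodup_nil
  | a :: xs =>
    rw [dedupF_cons, List.nodup_cons]
    refine ⟨?_, dedupF_nodup _⟩
    rw [dedupF_mem, List.mem_filter]
    rintro ⟨_, hb⟩
    simp at hb
termination_by l.length
decreasing_by simpa using Nat.lt_succ_of_le (List.length_filter_le _ xs)

theorem dedupF_pairwise (l : List String) (h : l.Pairwise (· ≤ ·)) :
    (dedupF l).Pairwise (· ≤ ·) := by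
  match l with
  | [] => rw [dedupF_nil]; exact List.Pairwise.nil
  | a :: xs =>
    rw [List.pairwise_cons] at h
    rw [dedupF_cons, List.pairwise_cons]
    refine ⟨?_, dedupF_pairwise _ (h.2.sublist List.filter_sublist)⟩
    intro x hx
    rw [dedupF_mem, List.mem_filter] at hx
    exact h.1 x hx.1
termination_by l.length
decreasing_by simpa using Nat.lt_succ_of_le (List.length_filter_le _ xs)

-- the group scan over a key-sorted list, named abstractly
theorem groupScan_eq (l : List (String × Option Int))
    (h : (l.map Prod.fst).Pairwise (· ≤ ·)) :
    groupScan l = (dedupF (l.map Prod.fst)).map (fun n => (n, valOf l n)) := by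
  match l with
  | [] => rw [groupScan_nil, List.map_nil, dedupF_nil]; rfl
  | p :: rest =>
    rw [List.map_cons, List.pairwise_cons] at h
    obtain ⟨hple, hrest⟩ := h
    have hsplit : rest.takeWhile (fun q => q.1 == p.1) ++
        rest.dropWhile (fun q => q.1 == p.1) = rest := List.takeWhile_append_dropWhile
    set tw := rest.takeWhile (fun q => q.1 == p.1) with htw
    set dw := rest.dropWhile (fun q => q.1 == p.1) with hdw
    have htwk : ∀ q ∈ tw, q.1 = p.1 := by
      intro q hq
      have := List.mem_takeWhile_imp hq
      simpa using this
    have hdw_sub : dw.Sublist rest := by rw [hdw]; exact List.dropWhile_sublist _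
    have hdwk : ∀ q ∈ dw, p.1 < q.1 := by
      rw [hdw]
      exact dropWhile_key_gt p.1 rest hple hrest
    have hdwne : ∀ q ∈ dw, (q.1 == p.1) = false := by
      intro q hq
      simpa using ne_of_gt (hdwk q hq)
    -- the filter of the whole list at the head name is the head group
    have hfilter_head : (p :: rest).filter (fun q => q.1 == p.1) = p :: tw := by
      rw [List.filter_cons_of_pos (by simp), ← hsplit, List.filter_append,
        List.filter_eq_self.mpr (fun q hq => by simp [htwk q hq]),
        List.filter_eq_nil_iff.mpr (fun q hq => by simp [hdwne q hq]), List.append_nil]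
    -- the dedup of the keys
    have hkeys : (p :: rest).map Prod.fst = p.1 :: (tw.map Prod.fst ++ dw.map Prod.fst) := by
      rw [← hsplit]; simp
    have hded : dedupF ((p :: rest).map Prod.fst) = p.1 :: dedupF (dw.map Prod.fst) := by
      rw [hkeys, dedupF_cons, List.filter_append,
        List.filter_eq_nil_iff.mpr (fun k hk => by
          obtain ⟨q, hq, rfl⟩ := List.mem_map.mp hk
          simp [htwk q hq]),
        List.filter_eq_self.mpr (fun k hk => by
          obtain ⟨q, hq, rfl⟩ := List.mem_map.mp hk
          simpa using ne_of_gt (hdwk q hq)), List.nil_append]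
    -- head value
    have hhead : tw.foldl bstep p.2 = valOf (p :: rest) p.1 := by
      rw [valOf, hfilter_head, List.map_cons, List.foldl_cons]
      refine bstep_foldl _ _ _ ?_
      rcases p with ⟨m, _ | v⟩ <;> rfl
    -- tail values agree between dw and the whole list
    have htail : ∀ n ∈ dedupF (dw.map Prod.fst), valOf dw n = valOf (p :: rest) n := by
      intro n hn
      rw [dedupF_mem] at hn
      obtain ⟨q, hq, rfl⟩ := List.mem_map.mp hn
      have hlt := hdwk q hq
      have htw0 : tw.filter (fun r => r.1 == q.1) = [] :=
        List.filter_eq_nil_iff.mpr (fun r hr => by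
          have := htwk r hr
          simp only [this]
          simpa using ne_of_lt hlt)
      have h1 : (p :: rest).filter (fun r => r.1 == q.1) = dw.filter (fun r => r.1 == q.1) := by
        rw [List.filter_cons_of_neg (by simpa using ne_of_lt hlt), ← hsplit,
          List.filter_append, htw0, List.nil_append]
      unfold valOf
      rw [h1]
    have hrec := groupScan_eq dw (hrest.sublist (hdw_sub.map _))
    rw [groupScan_cons, ← htw, ← hdw, hrec, hded, List.map_cons, hhead]
    congr 1
    exact List.map_congr_left (fun n hn => by rw [htail n hn])
termination_by l.length
decreasing_by simpa using Nat.lt_succ_of_le (List.length_dropWhile_le _ rest)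

-- ===== VERDICT (by name: the statement is the Claim_ definition above) =====
theorem make_bus_spec : Claim_equal_make_bus := by
  intro wires _hdom hpre
  unfold Spec_make_bus
  set P := wires.map parseWire with hP
  set S := PySem.List.sorted P (fun p => p.1) false with hS
  set G := wires.foldl gStepW PySem.Dict.empty with hG
  have hGP : G = P.foldl gstep PySem.Dict.empty := foldl_gStepW_eq wires _ hpre
  have hSperm : S.Perm P := PySem.List.sorted_perm _ _ _
  have hSpair : (S.map Prod.fst).Pairwise (· ≤ ·) :=
    (PySem.List.sorted_pairwise P (fun p => p.1)).map _ (fun _ _ h => h)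
  -- every name's value agrees between the ghost dict and the group scan
  have hvals : ∀ n, (G.get? n).getD none = valOf S n := by
    intro n
    rw [hGP, gfold_get?, PySem.Dict.get?_empty, valOf_perm S P hSperm n]
    rfl
  -- the sorted ghost keys are exactly the dedup of the sorted parsed names
  have hmemG : ∀ n, n ∈ G.keys ↔ n ∈ S.map Prod.fst := by
    intro n
    constructor
    · intro hn
      by_contra hnn
      have hfe : P.filter (fun q => q.1 == n) = [] := by
        rw [List.filter_eq_nil_iff]
        intro q hq hqn
        exact hnn (((hSperm.map Prod.fst).mem_iff).mpr
          (List.mem_map.mpr ⟨q, hq, by simpa using hqn⟩))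
      have h0 : G.get? n = none := by
        rw [hGP, gfold_get?, PySem.Dict.get?_empty, hfe]
        rfl
      exact ((PySem.Dict.get?_eq_none_iff_not_mem_keys _ _).mp h0) hn
    · intro hn
      obtain ⟨q, hq, rfl⟩ := List.mem_map.mp hn
      have hqP : q ∈ P := hSperm.mem_iff.mp hq
      by_contra hnn
      have h0 : G.get? q.1 = none :=
        (PySem.Dict.get?_eq_none_iff_not_mem_keys _ _).mpr hnn
      rw [hGP, gfold_get?, PySem.Dict.get?_empty] at h0
      have := (foldl_aStep_eq_none _ _ h0).1
      rw [List.map_eq_nil_iff, List.filter_eq_nil_iff] at this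
      exact this q hqP (by simp)
  have hsortG : PySem.List.sorted G.keys (fun x => x) false = dedupF (S.map Prod.fst) := by
    refine PySem.List.sorted_id_eq_of_perm_of_pairwise _ _ ?_ (dedupF_pairwise _ hSpair)
    rw [List.perm_ext_iff_of_nodup (dedupF_nodup _) (ghost_keys_nodup wires hpre)]
    intro n
    rw [dedupF_mem, hmemG]
  rw [A_eq_ghost wires hpre, ← hG, hsortG]
  show _ = groupScan S
  rw [groupScan_eq S hSpair]
  exact List.map_congr_left (fun n _ => by rw [hvals n])
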